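-- pv_equiv track=rewrite | github.com/abiodunfreeman/codewar | 7-kyu/highest_and+lowest.py | high_and_low
-- ===== SOURCE A (Python) =====
-- def high_and_low(numbers):
--     numbers = numbers.split()
--     largest_number = int(numbers[0])
--     lowest_number = int(numbers[0])
--     pos = 0
--
--     for num in numbers:
--         numbers[pos] = int(num)
--         pos = pos + 1
--
--     for num in numbers:
--         if num > largest_number:
--             largest_number = num
--         if num < lowest_number:
--             lowest_number = num
--
--     numbers = f"{largest_number} {lowest_number}"
--     return numbers
-- ===== SOURCE B (Python) =====
-- def high_and_low(numbers):
--     nums = sorted(int(x) for x in numbers.split())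
--     return f"{nums[-1]} {nums[0]}"
-- ===== Notes on version B (the rewrite author's own statement) =====
-- stated objective: simpler
-- what changed: Replaces the in-place int-conversion loop plus explicit min/max scan with sort-then-index: build the sorted int list once and read the largest off the end and the smallest off the front.
import Mathlib
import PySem

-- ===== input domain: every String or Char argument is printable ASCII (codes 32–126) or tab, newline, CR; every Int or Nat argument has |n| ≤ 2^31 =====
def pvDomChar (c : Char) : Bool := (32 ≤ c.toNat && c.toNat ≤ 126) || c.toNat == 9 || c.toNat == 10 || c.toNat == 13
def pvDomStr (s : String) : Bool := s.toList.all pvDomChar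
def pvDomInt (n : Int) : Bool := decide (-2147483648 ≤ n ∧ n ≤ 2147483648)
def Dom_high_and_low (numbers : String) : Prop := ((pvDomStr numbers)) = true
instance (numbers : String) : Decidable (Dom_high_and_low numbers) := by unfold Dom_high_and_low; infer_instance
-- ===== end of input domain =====

-- B changes the algorithm: sort the parsed ints once, read max off the end and min off the front.

-- ===== PORT A =====
def high_and_low (numbers : String) : String :=
  let ns := PySem.Str.split₀ numbers
  let largest_number : Int := (PySem.Int.ofStr? (PySem.List.pyGetD ns 0 "")).getD 0
  let lowest_number : Int := largest_number
  -- first loop: numbers[pos] = int(num) — builds the int list in traversal order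
  let ints : List Int := ns.foldl (fun acc num => acc ++ [(PySem.Int.ofStr? num).getD 0]) []
  -- second loop: the explicit max/min scan
  let p : Int × Int := ints.foldl
    (fun p num => (if num > p.1 then num else p.1, if num < p.2 then num else p.2))
    (largest_number, lowest_number)
  PySem.Int.toStr p.1 ++ " " ++ PySem.Int.toStr p.2

-- ===== PORT B =====
def high_and_low_alt (numbers : String) : String :=
  let nums := PySem.List.sorted ((PySem.Str.split₀ numbers).map (fun x => (PySem.Int.ofStr? x).getD 0)) id false
  PySem.Int.toStr (PySem.List.pyGetD nums (-1) 0) ++ " " ++ PySem.Int.toStr (PySem.List.pyGetD nums 0 0)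

-- ===== PRECONDITION & SPEC =====
-- Pre_ excludes exactly the inputs where the Python A raises: an empty word list (IndexError)
-- or a word that int() rejects (ValueError); B raises the same way there.
def Pre_high_and_low (numbers : String) : Prop :=
  PySem.Str.split₀ numbers ≠ [] ∧ ∀ w ∈ PySem.Str.split₀ numbers, (PySem.Int.ofStr? w).isSome
instance (numbers : String) : Decidable (Pre_high_and_low numbers) := by unfold Pre_high_and_low; infer_instance
def pvWitness_high_and_low : String := " 4 5 29 "

def Spec_high_and_low (numbers : String) (out : String) : Prop := out = high_and_low_alt numbers
instance (numbers : String) (out : String) : Decidable (Spec_high_and_low numbers out) := by unfold Spec_high_and_low; infer_instance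

-- ===== CLAIM =====
def Claim_equal_high_and_low : Prop := ∀ (numbers : String), Dom_high_and_low numbers → Pre_high_and_low numbers → Spec_high_and_low numbers (high_and_low numbers)

-- ===== LEMMAS AND PROOFS =====

-- the pair fold of A's second loop is (foldl max, foldl min)
lemma pairfold (l : List Int) (a b : Int) :
    l.foldl (fun p num => (if num > p.1 then num else p.1, if num < p.2 then num else p.2)) (a, b)
      = (l.foldl max a, l.foldl min b) := by
  induction l generalizing a b with
  | nil => rfl
  | cons c t ih =>
      simp only [List.foldl_cons, ih]
      have h1 : (if c > a then c else a) = max a c := by omega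
      have h2 : (if c < b then c else b) = min b c := by omega
      rw [h1, h2]

lemma foldl_max_mem_cons (l : List Int) (a : Int) : l.foldl max a ∈ a :: l := by
  induction l generalizing a with
  | nil => simp
  | cons c t ih =>
      simp only [List.foldl_cons]
      rcases max_choice a c with h' | h' <;> rw [h']
      · rcases List.mem_cons.1 (ih a) with h | h <;> simp [h]
      · rcases List.mem_cons.1 (ih c) with h | h <;> simp [h]

lemma foldl_min_mem_cons (l : List Int) (a : Int) : l.foldl min a ∈ a :: l := by
  induction l generalizing a with
  | nil => simp
  | cons c t ih =>
      simp only [List.foldl_cons]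
      rcases min_choice a c with h' | h' <;> rw [h']
      · rcases List.mem_cons.1 (ih a) with h | h <;> simp [h]
      · rcases List.mem_cons.1 (ih c) with h | h <;> simp [h]

lemma foldl_min_le (t : List Int) (a : Int) :
    t.foldl min a ≤ a ∧ ∀ y ∈ t, t.foldl min a ≤ y := by
  induction t generalizing a with
  | nil => simp
  | cons c s ih =>
      obtain ⟨h1, h2⟩ := ih (min a c)
      refine ⟨le_trans h1 (min_le_left _ _), ?_⟩
      intro y hy
      rcases List.mem_cons.1 hy with rfl | hy
      · exact le_trans h1 (min_le_right _ _)
      · exact h2 y hy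

lemma pairwise_le_getLast (l : List Int) (h : l ≠ []) (hp : l.Pairwise (· ≤ ·)) :
    ∀ x ∈ l, x ≤ l.getLast h := by
  induction l with
  | nil => simp at h
  | cons a t ih =>
      rcases List.pairwise_cons.1 hp with ⟨ha, hpt⟩
      intro x hx
      rcases List.mem_cons.1 hx with rfl | hx
      · cases t with
        | nil => simp
        | cons b s =>
            rw [List.getLast_cons (by simp)]
            exact ha _ (List.getLast_mem _)
      · have ht : t ≠ [] := by intro h'; simp [h'] at hx
        rw [List.getLast_cons ht]
        exact ih ht hpt x hx

lemma pairwise_head_le (a : Int) (t : List Int) (hp : (a :: t).Pairwise (· ≤ ·)) :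
    ∀ x ∈ a :: t, a ≤ x := by
  rcases List.pairwise_cons.1 hp with ⟨ha, _⟩
  intro x hx
  rcases List.mem_cons.1 hx with rfl | hx
  · exact le_refl x
  · exact ha x hx

-- ===== VERDICT =====
theorem high_and_low_spec : Claim_equal_high_and_low := by
  intro numbers _ hpre
  obtain ⟨hne, _⟩ := hpre
  unfold Spec_high_and_low high_and_low high_and_low_alt
  obtain ⟨w, wt, hsp⟩ := List.exists_cons_of_ne_nil hne
  have hbuild : ∀ (l : List String) (acc : List Int),
      l.foldl (fun acc num => acc ++ [(PySem.Int.ofStr? num).getD 0]) acc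
        = acc ++ l.map (fun x => (PySem.Int.ofStr? x).getD 0) := by
    intro l
    induction l with
    | nil => simp
    | cons c t ih => intro acc; simp [ih]
  set xs : List Int := (w :: wt).map (fun x => (PySem.Int.ofStr? x).getD 0) with hxs
  set fw : Int := (PySem.Int.ofStr? w).getD 0 with hfw
  have hfwmem : fw ∈ xs := by simp [hxs, hfw]
  have hxne : xs ≠ [] := by simp [hxs]
  set nums := PySem.List.sorted xs id false with hnums
  have hperm : nums.Perm xs := PySem.List.sorted_perm xs id false
  have hnumsne : nums ≠ [] := fun h' => hxne ((h' ▸ hperm).symm.eq_nil)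
  have hpair : nums.Pairwise (· ≤ ·) := PySem.List.sorted_pairwise xs id
  have hmemiff : ∀ y : Int, y ∈ nums ↔ y ∈ xs := fun y => hperm.mem_iff
  -- A's extremes
  have hhead : PySem.List.pyGetD (w :: wt) 0 "" = w := by
    simp [PySem.List.pyGetD_zero_cons]
  have hM := PySem.List.le_foldl_max xs fw
  have hMmem : xs.foldl max fw ∈ xs := by
    rcases List.mem_cons.1 (foldl_max_mem_cons xs fw) with h | h
    · rw [h]; exact hfwmem
    · exact h
  have hm := foldl_min_le xs fw
  have hmmem : xs.foldl min fw ∈ xs := by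
    rcases List.mem_cons.1 (foldl_min_mem_cons xs fw) with h | h
    · rw [h]; exact hfwmem
    · exact h
  -- B's extremes
  have hlast_mem : nums.getLast hnumsne ∈ xs := (hmemiff _).1 (List.getLast_mem _)
  have hlast_max : ∀ x ∈ xs, x ≤ nums.getLast hnumsne := fun x hx =>
    pairwise_le_getLast nums hnumsne hpair x ((hmemiff _).2 hx)
  obtain ⟨n0, nt, hcons⟩ := List.exists_cons_of_ne_nil hnumsne
  have hhead_mem : n0 ∈ xs := (hmemiff _).1 (by simp [hcons])
  have hhead_min : ∀ x ∈ xs, n0 ≤ x := by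
    intro x hx
    exact pairwise_head_le n0 nt (hcons ▸ hpair) x (hcons ▸ (hmemiff _).2 hx)
  -- the two computations agree
  have heqmax : xs.foldl max fw = nums.getLast hnumsne :=
    le_antisymm (hlast_max _ hMmem) (hM.2 _ hlast_mem)
  have heqmin : xs.foldl min fw = n0 :=
    le_antisymm (hm.2 _ hhead_mem) (hhead_min _ hmmem)
  have hget_last : PySem.List.pyGetD nums (-1) 0 = nums.getLast hnumsne :=
    PySem.List.pyGetD_neg_one nums 0 hnumsne
  have hget_head : PySem.List.pyGetD nums 0 0 = n0 := by
    rw [hcons]; simp [PySem.List.pyGetD_zero_cons]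
  simp only [hsp, hhead, hbuild, List.nil_append, ← hxs, ← hfw, pairfold,
    hget_last, hget_head, ← hnums, heqmax, heqmin]
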